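-- pv_equiv track=rewrite | github.com/SorokaD/leetcode.com | 914. X of a Kind in a Deck of Cards.py | solution
-- ===== SOURCE A (Python) =====
-- def solution(deck):
--     set_deck = set(deck)
--     rslt = []
--     for i in set_deck:
--         rslt.append(deck.count(i))
--     if len(set(rslt)) > 1:
--         return False
--     return True
-- ===== SOURCE B (Python) =====
-- def solution(deck):
--     s = sorted(deck)
--     runs = set()
--     i = 0
--     n = len(s)
--     while i < n:
--         j = i + 1
--         while j < n and s[j] == s[i]:
--             j += 1
--         runs.add(j - i)
--         i = j
--     return len(runs) <= 1
-- ===== Notes on version B (the rewrite author's own statement) =====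
-- stated objective: faster
-- what changed: B sorts the deck and scans it once collecting the lengths of maximal runs of equal consecutive elements into a set, returning True iff that set has at most one element, instead of A's hashing the distinct values and rescanning the whole deck with .count for each of them.
import Mathlib
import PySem

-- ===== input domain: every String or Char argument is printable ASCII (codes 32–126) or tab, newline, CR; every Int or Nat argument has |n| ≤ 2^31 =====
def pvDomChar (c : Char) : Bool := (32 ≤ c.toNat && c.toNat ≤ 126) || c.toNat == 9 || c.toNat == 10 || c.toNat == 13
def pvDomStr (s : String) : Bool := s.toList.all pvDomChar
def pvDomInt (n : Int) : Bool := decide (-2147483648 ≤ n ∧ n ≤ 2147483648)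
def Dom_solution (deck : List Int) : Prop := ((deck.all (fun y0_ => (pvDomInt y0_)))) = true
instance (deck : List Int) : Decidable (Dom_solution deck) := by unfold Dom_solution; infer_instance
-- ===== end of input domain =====

-- B sorts the deck and scans run lengths of equal consecutive elements instead of A's
-- distinct-set + repeated deck.count rescans (objective: faster, measured).

-- ===== PORT A =====
def solution (deck : List Int) : Bool :=
  let set_deck : PySem.Set Int := PySem.Set.ofList deck
  let rslt : List Int := set_deck.foldl (fun acc i => acc ++ [((PySem.List.count deck i : Int))]) []
  if PySem.Set.len (PySem.Set.ofList rslt) > 1 then false else true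

-- ===== PORT B =====
-- Source B's index-based while loops scan the sorted list run by run (inner loop = one maximal
-- run of elements equal to s[i], outer loop advances to the next run); this recursion is the
-- same scan expressed structurally: takeWhile (== x) is exactly the inner while, the run
-- length j - i is 1 + its length, and the recursive call on dropWhile is the next outer step.
def runLengths : List Int → List Int
  | [] => []
  | x :: xs =>
    ((1 + (xs.takeWhile (fun y => y == x)).length : Nat) : Int)
      :: runLengths (xs.dropWhile (fun y => y == x))
termination_by l => l.length
decreasing_by
  simpa using Nat.lt_succ_of_le (List.length_dropWhile_le _ _)

def solution_alt (deck : List Int) : Bool :=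
  let s := PySem.List.sorted deck (fun x => x) false
  let runs := PySem.Set.ofList (runLengths s)
  decide (PySem.Set.len runs ≤ 1)

-- ===== PRECONDITION & SPEC =====
def Spec_solution (deck : List Int) (out : Bool) : Prop := out = solution_alt deck
instance (deck : List Int) (out : Bool) : Decidable (Spec_solution deck out) := by unfold Spec_solution; infer_instance

-- ===== CLAIM (what is proved, stated in full; the proofs are below) =====
def Claim_equal_solution : Prop := ∀ (deck : List Int), Dom_solution deck → Spec_solution deck (solution deck)

-- ===== LEMMAS AND PROOFS =====

-- "all counts equal": the condition both programs decide
def AllEq (deck : List Int) : Prop :=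
  ∀ a ∈ deck, ∀ b ∈ deck, ((deck.count a : Int) = (deck.count b : Int))

-- the set of a list has ≤ 1 element iff all elements of the list are equal
theorem setlen_le_one_iff (L : List Int) :
    PySem.Set.len (PySem.Set.ofList L) ≤ 1 ↔ ∀ a ∈ L, ∀ b ∈ L, a = b := by
  have hn := PySem.Set.nodup_ofList L
  have hm : ∀ x, x ∈ PySem.Set.ofList L ↔ x ∈ L := fun x => PySem.Set.mem_ofList L x
  simp only [PySem.Set.len]
  rw [show ((((PySem.Set.ofList L : List Int).length : Int)) ≤ 1 ↔
      (PySem.Set.ofList L : List Int).length ≤ 1) from by exact_mod_cast Iff.rfl]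
  constructor
  · intro h a ha b hb
    have ha' := (hm a).mpr ha
    have hb' := (hm b).mpr hb
    rcases hL : (PySem.Set.ofList L : List Int) with _ | ⟨v, _ | ⟨w, t⟩⟩
    · rw [hL] at ha'; simp at ha'
    · rw [hL] at ha' hb'; simp at ha' hb'; rw [ha', hb']
    · rw [hL] at h; simp at h
  · intro h
    rcases hL : (PySem.Set.ofList L : List Int) with _ | ⟨v, _ | ⟨w, t⟩⟩
    · simp
    · simp
    · exfalso
      have hv : v ∈ L := (hm v).mp (by rw [hL]; simp)
      have hw : w ∈ L := (hm w).mp (by rw [hL]; simp)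
      have := h v hv w hw
      rw [hL] at hn
      simp_all

-- elements after the first run of a ≤-sorted tail are strictly greater than the head
theorem drop_gt (x : Int) (xs : List Int) (hp : (x :: xs).Pairwise (· ≤ ·)) :
    ∀ z ∈ xs.dropWhile (fun y => y == x), x < z := by
  intro z hz
  have hle : x ≤ z := (List.pairwise_cons.mp hp).1 z (List.dropWhile_sublist _ |>.mem hz)
  rcases lt_or_eq_of_le hle with h | h
  · exact h
  · exfalso
    -- z = x: but the head of dropWhile is ≠ x and everything after is ≥ the head
    have hpd : (xs.dropWhile (fun y => y == x)).Pairwise (· ≤ ·) :=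
      (List.pairwise_cons.mp hp).2.sublist (List.dropWhile_sublist _)
    match hd : xs.dropWhile (fun y => y == x), hz, hpd with
    | w :: t, hz, hpd =>
      have hwx : ¬ (w == x) = true := by
        have := List.head?_dropWhile_not (fun y => y == x) xs
        rw [hd] at this; simpa using this
      have hxw : x ≤ w := (List.pairwise_cons.mp hp).1 w ((List.dropWhile_sublist _).mem (by rw [hd]; simp))
      have hwz : w ≤ z := by
        rcases List.mem_cons.mp hz with h1 | h1
        · omega
        · exact (List.pairwise_cons.mp hpd).1 z h1
      simp at hwx
      omega

-- run lengths of a ≤-sorted list are exactly the counts of its members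
theorem mem_runLengths_iff (s : List Int) (hp : s.Pairwise (· ≤ ·)) :
    ∀ r, r ∈ runLengths s ↔ ∃ v ∈ s, (s.count v : Int) = r := by
  induction s using runLengths.induct with
  | case1 => simp [runLengths]
  | case2 x xs ih =>
    intro r
    set t := xs.takeWhile (fun y => y == x) with ht
    set d := xs.dropWhile (fun y => y == x) with hd
    have hsplit : xs = t ++ d := (List.takeWhile_append_dropWhile).symm
    have htx : ∀ y ∈ t, y = x := by
      intro y hy
      have := List.mem_takeWhile_imp hy
      simpa using this
    have hdgt : ∀ z ∈ d, x < z := drop_gt x xs hp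
    have hpd : d.Pairwise (· ≤ ·) :=
      (List.pairwise_cons.mp hp).2.sublist (List.dropWhile_sublist _)
    have hcx : (x :: xs).count x = 1 + t.length := by
      have h1 : t.count x = t.length := by
        rw [List.count_eq_length]; intro y hy; rw [htx y hy]
      have h2 : d.count x = 0 := by
        rw [List.count_eq_zero]; intro hx; exact absurd (hdgt x hx) (lt_irrefl x)
      rw [List.count_cons_self, hsplit, List.count_append, h1, h2]
      omega
    have hcd : ∀ v ∈ d, (x :: xs).count v = d.count v := by
      intro v hv
      have hvx : v ≠ x := fun h => absurd (hdgt v hv) (by rw [h]; exact lt_irrefl x)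
      have h1 : t.count v = 0 := by
        rw [List.count_eq_zero]; intro hvt; exact hvx (htx v hvt)
      have h2 : (x :: xs).count v = xs.count v := by
        simp [List.count_cons]
        exact fun h => hvx h.symm
      rw [h2, hsplit, List.count_append, h1]
      omega
    rw [runLengths]
    simp only [List.mem_cons, ← ht, ← hd]
    rw [ih hpd r]
    constructor
    · rintro (h | ⟨v, hv, hc⟩)
      · exact ⟨x, by simp, by rw [hcx]; omega⟩
      · refine ⟨v, Or.inr (hsplit ▸ List.mem_append_right t hv), ?_⟩
        rw [hcd v hv]; exact hc
    · rintro ⟨v, hv, hc⟩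
      rcases hv with h | h
      · left; rw [h] at hc; rw [hcx] at hc; omega
      · rw [hsplit] at h
        rcases List.mem_append.mp h with h1 | h1
        · left
          rw [htx v h1] at hc; rw [hcx] at hc; omega
        · right; exact ⟨v, h1, by rw [← hcd v h1]; exact hc⟩

-- A decides AllEq
theorem solution_iff (deck : List Int) : solution deck = true ↔ AllEq deck := by
  unfold solution AllEq
  dsimp only
  rw [PySem.List.foldl_append_singleton_eq_map, List.nil_append]
  set c := PySem.Set.len (PySem.Set.ofList ((PySem.Set.ofList deck).map
      (fun i => ((PySem.List.count deck i : Int))))) with hc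
  have hstep : (if c > 1 then false else true) = true ↔ c ≤ 1 := by
    split_ifs with h
    · simp; omega
    · simp; omega
  rw [hstep, hc, setlen_le_one_iff]
  constructor
  · intro h a ha b hb
    have := h ((deck.count a : Int)) (by
        rw [List.mem_map]
        exact ⟨a, (PySem.Set.mem_ofList _ _).mpr ha, by rw [PySem.List.count_eq]⟩)
      ((deck.count b : Int)) (by
        rw [List.mem_map]
        exact ⟨b, (PySem.Set.mem_ofList _ _).mpr hb, by rw [PySem.List.count_eq]⟩)
    exact this
  · intro h a ha b hb
    rw [List.mem_map] at ha hb
    obtain ⟨u, hu, rfl⟩ := ha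
    obtain ⟨v, hv, rfl⟩ := hb
    rw [PySem.List.count_eq, PySem.List.count_eq]
    exact h u ((PySem.Set.mem_ofList _ _).mp hu) v ((PySem.Set.mem_ofList _ _).mp hv)

-- B decides AllEq
theorem solution_alt_iff (deck : List Int) : solution_alt deck = true ↔ AllEq deck := by
  unfold solution_alt AllEq
  dsimp only
  rw [decide_eq_true_iff, setlen_le_one_iff]
  set s := PySem.List.sorted deck (fun x => x) false with hs
  have hperm : s.Perm deck := PySem.List.sorted_perm ..
  have hp : s.Pairwise (· ≤ ·) := by
    have := PySem.List.sorted_pairwise (xs := deck) (key := fun x => x)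
    simpa using this
  have hmem := mem_runLengths_iff s hp
  have hcnt : ∀ v, s.count v = deck.count v := fun v => hperm.count_eq v
  constructor
  · intro h a ha b hb
    have h1 : ((deck.count a : Int)) ∈ runLengths s := by
      rw [hmem]; exact ⟨a, hperm.mem_iff.mpr ha, by rw [hcnt]⟩
    have h2 : ((deck.count b : Int)) ∈ runLengths s := by
      rw [hmem]; exact ⟨b, hperm.mem_iff.mpr hb, by rw [hcnt]⟩
    exact h _ h1 _ h2
  · intro h r1 h1 r2 h2
    rw [hmem] at h1 h2
    obtain ⟨v1, hv1, rfl⟩ := h1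
    obtain ⟨v2, hv2, rfl⟩ := h2
    rw [hcnt, hcnt]
    exact h v1 (hperm.mem_iff.mp hv1) v2 (hperm.mem_iff.mp hv2)

-- ===== VERDICT (by name: the statement is the Claim_ definition above) =====
theorem solution_spec : Claim_equal_solution := by
  intro deck _
  unfold Spec_solution
  rw [Bool.eq_iff_iff, solution_iff, solution_alt_iff]
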